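-- pv_equiv track=rewrite | github.com/monacofj/moeabench | MoeaBench/diagnostics/baselines.py | snap_k
-- ===== SOURCE A (Python) =====
-- def snap_k(k_raw: int) -> int:
--     """
--     Snaps the raw population size K to the nearest supported baseline K
--     using a strict 'floor' logic for consistency with the audit protocol.
--
--     Rules:
--     - K < 10: Returns 10 (Minimum supported)
--     - 10 <= K < 50: Returns K (Exact match)
--     - K >= 50: Returns max(grid <= K) where grid=[50, 100, 150, 200]
--     """
--     if k_raw < 10:
--         return 10
--     if k_raw < 50:
--         return k_raw
--
--     grid = [50, 100, 150, 200]
--     # Filter grid items <= k_raw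
--     candidates = [g for g in grid if g <= k_raw]
--     if not candidates:
--         # Should not happen given k_raw >= 50 check, but safe fallback
--         return 50
--     return max(candidates)
-- ===== SOURCE B (Python) =====
-- def snap_k(k_raw: int) -> int:
--     if k_raw < 10:
--         return 10
--     if k_raw < 50:
--         return k_raw
--     return min((k_raw // 50) * 50, 200)
-- ===== Notes on version B (the rewrite author's own statement) =====
-- stated objective: simpler
-- what changed: Replaces the grid list, list-comprehension filter and max() call with the closed form min((k_raw // 50) * 50, 200) for the k_raw >= 50 case.
import Mathlib
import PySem

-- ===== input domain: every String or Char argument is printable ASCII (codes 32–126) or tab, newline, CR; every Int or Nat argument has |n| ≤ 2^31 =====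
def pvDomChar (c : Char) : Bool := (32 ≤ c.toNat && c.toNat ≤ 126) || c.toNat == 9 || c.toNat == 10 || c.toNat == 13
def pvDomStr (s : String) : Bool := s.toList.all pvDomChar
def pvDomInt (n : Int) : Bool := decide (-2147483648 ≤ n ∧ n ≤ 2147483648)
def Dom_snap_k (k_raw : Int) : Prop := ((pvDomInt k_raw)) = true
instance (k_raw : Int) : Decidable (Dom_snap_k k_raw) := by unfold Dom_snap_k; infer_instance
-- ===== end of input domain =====

-- B replaces the grid list/filter/max with the closed form min((k_raw // 50) * 50, 200) (objective: simpler).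

-- ===== PORT A =====
def snap_k (k_raw : Int) : Int :=
  if k_raw < 10 then 10
  else if k_raw < 50 then k_raw
  else
    let grid : List Int := [50, 100, 150, 200]
    let candidates := grid.filter (fun g => g ≤ k_raw)
    if candidates = [] then 50
    else match PySem.List.max? candidates (fun x => x) with
      | some m => m
      | none => 50   -- unreachable: candidates ≠ []

-- ===== PORT B =====
def snap_k_alt (k_raw : Int) : Int :=
  if k_raw < 10 then 10
  else if k_raw < 50 then k_raw
  else min (PySem.Int.floordiv k_raw 50 * 50) 200

-- ===== PRECONDITION & SPEC =====
def Spec_snap_k (k_raw : Int) (out : Int) : Prop := out = snap_k_alt k_raw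
instance (k_raw : Int) (out : Int) : Decidable (Spec_snap_k k_raw out) := by unfold Spec_snap_k; infer_instance

-- ===== CLAIM (what is proved, stated in full; the proofs are below) =====
def Claim_equal_snap_k : Prop := ∀ (k_raw : Int), Dom_snap_k k_raw → Spec_snap_k k_raw (snap_k k_raw)

-- ===== LEMMAS AND PROOFS =====

-- ===== VERDICT (by name: the statement is the Claim_ definition above) =====
theorem snap_k_spec : Claim_equal_snap_k := by
  intro k h
  unfold Spec_snap_k snap_k snap_k_alt
  split_ifs with h1 h2
  · rfl
  · rfl
  · -- k ≥ 50
    simp only [List.filter]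
    have hq := PySem.Int.floordiv_mul_add_mod k 50
    have hm0 := PySem.Int.mod_nonneg (a := k) (b := 50) (by norm_num)
    have hml := PySem.Int.mod_lt (a := k) (b := 50) (by norm_num)
    set q := PySem.Int.floordiv k 50 with hqdef
    set r := PySem.Int.mod k 50 with hrdef
    -- decide filter booleans by cases on ranges of k
    by_cases hA : k < 100
    · have : ¬ (100 ≤ k) := by omega
      have hq1 : q = 1 := by omega
      simp [show decide ((50:Int) ≤ k) = true by simp; omega,
            show decide ((100:Int) ≤ k) = false by simp; omega,
            show decide ((150:Int) ≤ k) = false by simp; omega,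
            show decide ((200:Int) ≤ k) = false by simp; omega,
            PySem.List.max?, hq1]
    · by_cases hB : k < 150
      · have hq1 : q = 2 := by omega
        simp [show decide ((50:Int) ≤ k) = true by simp; omega,
              show decide ((100:Int) ≤ k) = true by simp; omega,
              show decide ((150:Int) ≤ k) = false by simp; omega,
              show decide ((200:Int) ≤ k) = false by simp; omega,
              PySem.List.max?, hq1]
      · by_cases hC : k < 200
        · have hq1 : q = 3 := by omega
          simp [show decide ((50:Int) ≤ k) = true by simp; omega,
                show decide ((100:Int) ≤ k) = true by simp; omega,
                show decide ((150:Int) ≤ k) = true by simp; omega,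
                show decide ((200:Int) ≤ k) = false by simp; omega,
                PySem.List.max?, hq1]
        · have hq1 : 4 ≤ q := by omega
          simp [show decide ((50:Int) ≤ k) = true by simp; omega,
                show decide ((100:Int) ≤ k) = true by simp; omega,
                show decide ((150:Int) ≤ k) = true by simp; omega,
                show decide ((200:Int) ≤ k) = true by simp; omega,
                PySem.List.max?]
          omega
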